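-- pv_equiv track=rewrite | github.com/CClairvoyant/iti0102-2022 | EX/ex05_hobbies/hobbies.py | find_least_popular_hobbies
-- ===== SOURCE A (Python) =====
-- def create_dictionary_with_hobbies(data: str) -> dict:
--     """
--     Create dictionary about hobbies and their hobbyists ie. {hobby1: [name1, name2, ...], hobby2: [...]}.
--     :param data: given string from database
--     :return: dictionary, where keys are hobbies and values are lists of people. Values are sorted alphabetically
--     """
--     data_list = data.split("\n")
--     people_hobbies = {}
--     for person in data_list:
--         if person.split(":")[1] not in people_hobbies:
--             people_hobbies[person.split(":")[1]] = [person.split(":")[0]]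
--         else:
--             people_hobbies.get(person.split(":")[1]).append(person.split(":")[0])
--     for hobbies in people_hobbies.keys():
--         people_hobbies[hobbies] = list(set(people_hobbies.get(hobbies)))
--     for key in people_hobbies:
--         people_hobbies[key] = sorted(people_hobbies.get(key))
--     return people_hobbies
--
-- def find_least_popular_hobbies(data: str) -> list:
--     """
--     Find the least popular hobbies.
--
--     :param: data: given string from database
--     :return: list of the least popular hobbies. Sorted alphabetically.
--     """
--     hobby_list = create_dictionary_with_hobbies(data)
--     counts_of_people = []
--     hobbies_with_least_people = []
--     for hobby in hobby_list:
--         counts_of_people.append(len(hobby_list.get(hobby)))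
--     min_count_of_people = min(counts_of_people)
--     for hobby in hobby_list:
--         if len(hobby_list.get(hobby)) == min_count_of_people:
--             hobbies_with_least_people.append(hobby)
--     return sorted(hobbies_with_least_people)
-- ===== SOURCE B (Python) =====
-- def find_least_popular_hobbies(data: str) -> list:
--     """No grouping dict: scan sorted distinct hobbies, recount each from the raw
--     lines, and keep a running minimum with its current result list."""
--     lines = data.split("\n")
--     best = None
--     result = []
--     for hobby in sorted({line.split(":")[1] for line in lines}):
--         count = len({line.split(":")[0] for line in lines if line.split(":")[1] == hobby})
--         if best is None or count < best:
--             best, result = count, [hobby]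
--         elif count == best:
--             result.append(hobby)
--     return result
-- ===== Notes on version B (the rewrite author's own statement) =====
-- stated objective: alternative
-- what changed: B drops the grouping dict entirely: it sorts the distinct hobbies once and, scanning them in order, recounts each hobby's distinct hobbyists directly from the raw lines while maintaining a running minimum and the current result list (online minimum selection), so no hobby->names mapping, no counts list and no final sort exist.
import Mathlib
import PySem

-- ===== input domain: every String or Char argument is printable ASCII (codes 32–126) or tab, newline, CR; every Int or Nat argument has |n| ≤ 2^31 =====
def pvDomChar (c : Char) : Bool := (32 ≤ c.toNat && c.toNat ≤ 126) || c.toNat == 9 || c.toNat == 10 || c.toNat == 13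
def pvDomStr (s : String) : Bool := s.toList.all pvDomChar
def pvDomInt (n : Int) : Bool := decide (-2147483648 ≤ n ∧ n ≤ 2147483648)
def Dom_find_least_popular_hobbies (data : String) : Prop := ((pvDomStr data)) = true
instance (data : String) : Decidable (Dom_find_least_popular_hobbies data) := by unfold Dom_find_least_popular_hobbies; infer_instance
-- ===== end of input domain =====

-- B keeps no grouping dict: it scans the sorted distinct hobbies, recounts each hobby's
-- distinct hobbyists from the raw lines, and tracks the running minimum with its result
-- list (objective: alternative — a different algorithm of similar size, not faster).

-- shared parsing helpers: person.split(":"), person.split(":")[1], person.split(":")[0]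
def pvParts (line : String) : List String := (PySem.Str.split? line ":").getD []
def pvHobby (line : String) : String := PySem.List.pyGetD (pvParts line) 1 ""
def pvName (line : String) : String := PySem.List.pyGetD (pvParts line) 0 ""

-- ===== PORT A =====
def create_dictionary_with_hobbies (data : String) : PySem.Dict String (List String) :=
  let data_list := (PySem.Str.split? data "\n").getD []
  let d1 := data_list.foldl (fun d person =>
    if !(d.contains (pvHobby person)) then d.insert (pvHobby person) [pvName person]
    else d.insert (pvHobby person) (d.getD (pvHobby person) [] ++ [pvName person])) PySem.Dict.empty
  let d2 := d1.keys.foldl (fun d k => d.insert k (PySem.Set.ofList (d.getD k []))) d1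
  let d3 := d2.keys.foldl (fun d k => d.insert k (PySem.List.sorted (d.getD k []) (fun x => x) false)) d2
  d3

def find_least_popular_hobbies (data : String) : List String :=
  let hobby_list := create_dictionary_with_hobbies data
  let counts := hobby_list.keys.foldl (fun acc h => acc ++ [PySem.List.len (hobby_list.getD h [])]) ([] : List Int)
  let min_count := (PySem.List.min? counts (fun x => x)).getD 0
  let least := hobby_list.keys.foldl (fun acc h =>
      if PySem.List.len (hobby_list.getD h []) == min_count then acc ++ [h] else acc) ([] : List String)
  PySem.List.sorted least (fun x => x) false

-- ===== PORT B =====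
def find_least_popular_hobbies_alt (data : String) : List String :=
  let lines := (PySem.Str.split? data "\n").getD []
  ((PySem.List.sorted (PySem.Set.ofList (lines.map (fun line => pvHobby line))) (fun x => x) false).foldl
    (fun (st : Option Int × List String) hobby =>
      let count := PySem.Set.len (PySem.Set.ofList
        ((lines.filter (fun line => pvHobby line == hobby)).map (fun line => pvName line)))
      match st.1 with
      | none => (some count, [hobby])
      | some best =>
          if count < best then (some count, [hobby])
          else if count == best then (some best, st.2 ++ [hobby])
          else st) ((none : Option Int), ([] : List String))).2

-- ===== PRECONDITION & SPEC =====
-- Pre_ excludes exactly the inputs where some line of data lacks a colon separator (Python A raises IndexError there).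
def Pre_find_least_popular_hobbies (data : String) : Prop :=
  ∀ line ∈ (PySem.Str.split? data "\n").getD [], PySem.Str.isIn ":" line = true
instance (data : String) : Decidable (Pre_find_least_popular_hobbies data) := by
  unfold Pre_find_least_popular_hobbies; infer_instance
def pvWitness_find_least_popular_hobbies : String := "ann:golf\nbob:golf\ncarl:chess"

def Spec_find_least_popular_hobbies (data : String) (out : List String) : Prop :=
  out = find_least_popular_hobbies_alt data
instance (data : String) (out : List String) : Decidable (Spec_find_least_popular_hobbies data out) := by
  unfold Spec_find_least_popular_hobbies; infer_instance

-- ===== CLAIM (what is proved, stated in full; the proofs are below) =====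
def Claim_equal_find_least_popular_hobbies : Prop :=
  ∀ (data : String), Dom_find_least_popular_hobbies data →
    Pre_find_least_popular_hobbies data →
    Spec_find_least_popular_hobbies data (find_least_popular_hobbies data)

-- ===== LEMMAS AND PROOFS =====

-- proof-side names for the ports' intermediate values
def pvLines (data : String) : List String := (PySem.Str.split? data "\n").getD []
def pvStepA (d : PySem.Dict String (List String)) (person : String) : PySem.Dict String (List String) :=
  if !(d.contains (pvHobby person)) then d.insert (pvHobby person) [pvName person]
  else d.insert (pvHobby person) (d.getD (pvHobby person) [] ++ [pvName person])
def pvVal (d : PySem.Dict String (List String)) (person : String) : List String :=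
  if d.contains (pvHobby person) then d.getD (pvHobby person) [] ++ [pvName person] else [pvName person]
def pvD1 (data : String) : PySem.Dict String (List String) :=
  (pvLines data).foldl pvStepA PySem.Dict.empty
def pvD2 (data : String) : PySem.Dict String (List String) :=
  (pvD1 data).keys.foldl (fun d k => d.insert k (PySem.Set.ofList (d.getD k []))) (pvD1 data)
def pvD3 (data : String) : PySem.Dict String (List String) :=
  (pvD2 data).keys.foldl (fun d k => d.insert k (PySem.List.sorted (d.getD k []) (fun x => x) false)) (pvD2 data)
def pvKeys (data : String) : List String := (pvD1 data).keys
def pvCountsA (data : String) : List Int :=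
  (pvD3 data).keys.foldl (fun acc h => acc ++ [PySem.List.len ((pvD3 data).getD h [])]) []
def pvMA (data : String) : Int := (PySem.List.min? (pvCountsA data) (fun x => x)).getD 0
def pvLeastA (data : String) : List String :=
  (pvD3 data).keys.foldl (fun acc h =>
    if PySem.List.len ((pvD3 data).getD h []) == pvMA data then acc ++ [h] else acc) []
-- B's per-hobby distinct count and its min-tracking loop body
def pvCnt (data : String) (h : String) : Int :=
  PySem.Set.len (PySem.Set.ofList
    (((pvLines data).filter (fun line => pvHobby line == h)).map (fun line => pvName line)))
def pvScanStep (f : String → Int) (st : Option Int × List String) (hobby : String) :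
    Option Int × List String :=
  match st.1 with
  | none => (some (f hobby), [hobby])
  | some best =>
      if f hobby < best then (some (f hobby), [hobby])
      else if f hobby == best then (some best, st.2 ++ [hobby])
      else st

theorem pvA_form (data : String) :
    find_least_popular_hobbies data = PySem.List.sorted (pvLeastA data) (fun x => x) false := rfl

theorem pvB_form (data : String) :
    find_least_popular_hobbies_alt data =
      ((PySem.List.sorted (PySem.Set.ofList ((pvLines data).map (fun line => pvHobby line)))
          (fun x => x) false).foldl (pvScanStep (pvCnt data))
        ((none : Option Int), ([] : List String))).2 := rfl

-- A's building loop is an insert-keyed fold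
theorem pvStepA_eq : pvStepA = fun d person => d.insert (pvHobby person) (pvVal d person) := by
  funext d person
  unfold pvStepA pvVal
  cases h : d.contains (pvHobby person)
  · simp
  · simp


theorem pvKeys_eq (data : String) :
    pvKeys data = PySem.Set.ofList ((pvLines data).map (fun line => pvHobby line)) := by
  unfold pvKeys pvD1
  rw [pvStepA_eq, PySem.Dict.keys_foldl_insert_key]
  simp [PySem.Set.update, PySem.Set.ofList]

theorem pvKeys_nodup (data : String) : (pvKeys data).Nodup := by
  rw [pvKeys_eq]; exact PySem.Set.nodup_ofList _

-- A's building loop groups names by hobby, in line order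
theorem pv_build_getD (lines : List String) :
    ∀ (d : PySem.Dict String (List String)) (h : String),
      (lines.foldl pvStepA d).getD h [] =
        d.getD h [] ++ (lines.filter (fun l => pvHobby l == h)).map (fun l => pvName l) := by
  induction lines with
  | nil => intro d h; simp
  | cons l rest ih =>
    intro d h
    rw [List.foldl_cons, ih]
    have hstep : (pvStepA d l).getD h [] =
        d.getD h [] ++ (if pvHobby l == h then [pvName l] else []) := by
      rw [pvStepA_eq]
      simp only []
      rw [PySem.Dict.getD_insert]
      by_cases hh : h = pvHobby l
      · have hb : (pvHobby l == h) = true := beq_iff_eq.mpr hh.symm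
        rw [if_pos hh, if_pos hb]
        unfold pvVal
        rw [← hh]
        cases hc : d.contains h
        · rw [if_neg Bool.false_ne_true, PySem.Dict.getD_of_not_contains d [] hc]
          simp
        · rw [if_pos rfl]
      · have hb : (pvHobby l == h) = false := beq_eq_false_iff_ne.mpr (fun e => hh e.symm)
        rw [if_neg hh, hb]
        simp
    rw [hstep, List.filter_cons]
    by_cases hl : pvHobby l == h
    · simp [hl, List.append_assoc]
    · simp at hl
      simp [hl]

theorem pvD1_getD (data : String) (h : String) :
    (pvD1 data).getD h [] =
      ((pvLines data).filter (fun l => pvHobby l == h)).map (fun l => pvName l) := by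
  unfold pvD1
  rw [pv_build_getD]
  simp

-- A's rewrite loops: 'for k in d: d[k] = g(d[k])' maps g over the values
theorem pv_mapval (g : List String → List String) :
    ∀ (ks : List String) (d : PySem.Dict String (List String)),
    d.keys.Nodup → ks.Nodup → (∀ k ∈ ks, d.contains k = true) →
    (ks.foldl (fun d' k => d'.insert k (g (d'.getD k []))) d).items =
      d.items.map (fun p => if p.1 ∈ ks then (p.1, g p.2) else p) := by
  intro ks
  induction ks with
  | nil => intro d _ _ _; simp
  | cons k rest ih =>
    intro d hnd hksnd hmem
    have hc : d.contains k = true := hmem k List.mem_cons_self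
    have hitems' : (d.insert k (g (d.getD k []))).items =
        d.items.map (fun p => if p.1 == k then (k, g (d.getD k [])) else p) :=
      PySem.Dict.items_insert_of_contains d _ hc
    have hkeys' : (d.insert k (g (d.getD k []))).keys = d.keys := by
      simp only [PySem.Dict.keys, hitems', List.map_map]
      apply List.map_congr_left
      intro p _
      by_cases hp : p.1 = k
      · simp [hp]
      · simp [hp]
    have hnd' : (d.insert k (g (d.getD k []))).keys.Nodup := hkeys' ▸ hnd
    have hmem' : ∀ k' ∈ rest, (d.insert k (g (d.getD k []))).contains k' = true := by
      intro k' hk'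
      rw [PySem.Dict.contains_eq_decide_mem_keys, hkeys',
          ← PySem.Dict.contains_eq_decide_mem_keys]
      exact hmem k' (List.mem_cons_of_mem _ hk')
    rw [List.foldl_cons, ih _ hnd' hksnd.of_cons hmem', hitems', List.map_map]
    apply List.map_congr_left
    intro p hp
    have hknr : k ∉ rest := (List.nodup_cons.mp hksnd).1
    by_cases hph : p.1 = k
    · have hgd : d.getD k [] = p.2 := by
        have h1 : d.getD p.1 [] = p.2 :=
          PySem.Dict.getD_of_mem_items d (k := p.1) (v := p.2) (by simpa using hp) hnd []
        rw [hph] at h1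
        exact h1
      simp only [Function.comp_apply, hph, BEq.rfl, if_true, hgd]
      simp [hknr]
    · have hbeq : (p.1 == k) = false := beq_eq_false_iff_ne.mpr hph
      simp only [Function.comp_apply, hbeq, Bool.false_eq_true, if_false, List.mem_cons]
      by_cases hpr : p.1 ∈ rest
      · simp [hpr]
      · simp [hpr, hph]

theorem pv_mapval_keys (g : List String → List String) (d : PySem.Dict String (List String))
    (hnd : d.keys.Nodup) :
    (d.keys.foldl (fun d' k => d'.insert k (g (d'.getD k []))) d).items =
      d.items.map (fun p => (p.1, g p.2)) := by
  rw [pv_mapval g d.keys d hnd hnd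
      (fun k hk => by rw [PySem.Dict.contains_eq_decide_mem_keys]; simpa using hk)]
  apply List.map_congr_left
  intro p hp
  simp [PySem.Dict.mem_keys_of_mem_items d hp]

theorem pv_keys_eq_of_items_mapval {dA dB : PySem.Dict String (List String)}
    (g : List String → List String)
    (h : dB.items = dA.items.map (fun p => (p.1, g p.2))) : dB.keys = dA.keys := by
  simp only [PySem.Dict.keys, h, List.map_map]
  rfl

theorem pvD3_items (data : String) :
    (pvD3 data).items = (pvD1 data).items.map
      (fun p => (p.1, PySem.List.sorted (PySem.Set.ofList p.2) (fun x => x) false)) := by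
  have h2 : (pvD2 data).items = (pvD1 data).items.map (fun p => (p.1, PySem.Set.ofList p.2)) :=
    pv_mapval_keys PySem.Set.ofList (pvD1 data) (pvKeys_nodup data)
  have hk2 : (pvD2 data).keys = (pvD1 data).keys := pv_keys_eq_of_items_mapval _ h2
  have hnd2 : (pvD2 data).keys.Nodup := hk2 ▸ pvKeys_nodup data
  have h3 := pv_mapval_keys (fun v => PySem.List.sorted v (fun x => x) false) (pvD2 data) hnd2
  rw [h2, List.map_map] at h3
  exact h3

theorem pvD3_keys (data : String) : (pvD3 data).keys = pvKeys data :=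
  pv_keys_eq_of_items_mapval
    (g := fun v => PySem.List.sorted (PySem.Set.ofList v) (fun x => x) false) (pvD3_items data)

theorem pvD3_nodup (data : String) : (pvD3 data).keys.Nodup := by
  rw [pvD3_keys]; exact pvKeys_nodup data

theorem pvD3_getD (data : String) (h : String) (hm : h ∈ pvKeys data) :
    (pvD3 data).getD h [] =
      PySem.List.sorted (PySem.Set.ofList ((pvD1 data).getD h [])) (fun x => x) false := by
  have h1 : (h, (pvD1 data).getD h []) ∈ (pvD1 data).items := by
    rw [PySem.Dict.items_eq_map_keys (pvD1 data) (pvKeys_nodup data) []]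
    exact List.mem_map.mpr ⟨h, hm, rfl⟩
  have h3 : (h, PySem.List.sorted (PySem.Set.ofList ((pvD1 data).getD h [])) (fun x => x) false)
      ∈ (pvD3 data).items := by
    rw [pvD3_items]
    exact List.mem_map.mpr ⟨_, h1, rfl⟩
  exact PySem.Dict.getD_of_mem_items (pvD3 data) h3 (pvD3_nodup data) []

-- the length A reads off d3 is B's distinct-hobbyist count
theorem pvLen_eq (data : String) (h : String) (hm : h ∈ pvKeys data) :
    PySem.List.len ((pvD3 data).getD h []) = pvCnt data h := by
  rw [pvD3_getD data h hm, pvD1_getD]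
  simp [PySem.List.len, PySem.Set.len, PySem.List.length_sorted, pvCnt]

theorem pvCountsA_eq (data : String) : pvCountsA data = (pvKeys data).map (pvCnt data) := by
  unfold pvCountsA
  rw [PySem.List.foldl_append_singleton_eq_map, List.nil_append, pvD3_keys]
  exact List.map_congr_left (fun h hm => pvLen_eq data h hm)

-- running minimum
theorem pv_foldl_min_le (l : List Int) : ∀ b : Int, l.foldl min b ≤ b := by
  induction l with
  | nil => intro b; simp
  | cons x t ih =>
    intro b
    rw [List.foldl_cons]
    exact le_trans (ih (min b x)) (min_le_left b x)

theorem pv_min_perm (xs ys : List Int) (hp : xs.Perm ys) :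
    (PySem.List.min? xs (fun x => x)).getD 0 = (PySem.List.min? ys (fun x => x)).getD 0 := by
  cases hx : PySem.List.min? xs (fun x => x) with
  | none =>
    have hxs : xs = [] := (PySem.List.min?_eq_none_iff xs _).mp hx
    subst hxs
    rw [(PySem.List.min?_eq_none_iff ys _).mpr hp.nil_eq.symm]
  | some m1 =>
    cases hy : PySem.List.min? ys (fun x => x) with
    | none =>
      have hys : ys = [] := (PySem.List.min?_eq_none_iff ys _).mp hy
      subst hys
      have hxs : xs = [] := hp.eq_nil
      subst hxs
      rw [(PySem.List.min?_eq_none_iff ([] : List Int) (fun x => x)).mpr rfl] at hx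
      simp at hx
    | some m2 =>
      have hm1 : m1 ∈ ys := hp.subset (PySem.List.min?_mem hx)
      have hm2 : m2 ∈ xs := hp.symm.subset (PySem.List.min?_mem hy)
      have h12 : m1 ≤ m2 := PySem.List.min?_isMin hx m2 hm2
      have h21 : m2 ≤ m1 := PySem.List.min?_isMin hy m1 hm1
      simp [le_antisymm h12 h21]

-- B's loop: online minimum selection over a list of hobbies
theorem pv_scan (f : String → Int) (hs : List String) :
    ∀ (b : Int) (res : List String),
      hs.foldl (pvScanStep f) (some b, res) =
        (some ((hs.map f).foldl min b),
         (if b = (hs.map f).foldl min b then res else []) ++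
           hs.filter (fun h => f h == (hs.map f).foldl min b)) := by
  induction hs with
  | nil => intro b res; simp
  | cons h t ih =>
    intro b res
    rw [List.foldl_cons, List.map_cons, List.foldl_cons]
    have hred : pvScanStep f (some b, res) h =
        if f h < b then (some (f h), [h])
        else if f h == b then (some b, res ++ [h]) else (some b, res) := rfl
    rcases lt_trichotomy (f h) b with hlt | heq | hgt
    · rw [hred, if_pos hlt, ih (f h) [h], min_eq_right hlt.le]
      have hm : (t.map f).foldl min (f h) ≤ f h := pv_foldl_min_le _ _
      have hbne : ¬ b = (t.map f).foldl min (f h) := by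
        intro e; rw [← e] at hm; exact absurd (lt_of_le_of_lt hm hlt) (lt_irrefl b)
      rw [if_neg hbne, List.nil_append, List.filter_cons]
      by_cases hfm : f h = (t.map f).foldl min (f h)
      · rw [if_pos hfm, if_pos (beq_iff_eq.mpr hfm)]
        simp
      · rw [if_neg hfm,
            if_neg (show ¬ (f h == (t.map f).foldl min (f h)) = true from
              fun hc => hfm (beq_iff_eq.mp hc))]
        simp
    · have h1 : ¬ f h < b := not_lt.mpr heq.ge
      have h2 : (f h == b) = true := beq_iff_eq.mpr heq
      rw [hred, if_neg h1, h2, if_pos rfl, ih b (res ++ [h])]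
      have hmin : min b (f h) = b := by rw [heq, min_self]
      rw [hmin, List.filter_cons]
      by_cases hbm : b = (t.map f).foldl min b
      · have hb2 : (f h == (t.map f).foldl min b) = true := by
          rw [beq_iff_eq, heq]; exact hbm
        rw [if_pos hbm, if_pos hbm, if_pos hb2]
        simp
      · have hb2 : ¬ (f h == (t.map f).foldl min b) = true := by
          rw [beq_iff_eq, heq]; exact hbm
        rw [if_neg hbm, if_neg hbm, if_neg hb2]
    · have h1 : ¬ f h < b := not_lt.mpr hgt.le
      have h2 : (f h == b) = false := beq_eq_false_iff_ne.mpr (ne_of_gt hgt)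
      rw [hred, if_neg h1, h2, if_neg (by simp), ih b res]
      have hmin : min b (f h) = b := min_eq_left hgt.le
      rw [hmin, List.filter_cons]
      have hm : (t.map f).foldl min b ≤ b := pv_foldl_min_le _ _
      rw [if_neg (show ¬ (f h == (t.map f).foldl min b) = true from
            fun hc => (ne_of_gt (lt_of_le_of_lt hm hgt)) (beq_iff_eq.mp hc))]

theorem find_least_popular_hobbies_eq (data : String) :
    find_least_popular_hobbies data = find_least_popular_hobbies_alt data := by
  rw [pvA_form, pvB_form]
  cases hhob : PySem.List.sorted (PySem.Set.ofList ((pvLines data).map (fun line => pvHobby line)))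
      (fun x => x) false with
  | nil =>
    have hset : PySem.Set.ofList ((pvLines data).map (fun line => pvHobby line)) = [] :=
      (PySem.List.sorted_eq_nil_iff _ _ _).mp hhob
    have hkeys : pvKeys data = [] := by rw [pvKeys_eq, hset]
    have hleast : pvLeastA data = [] := by
      unfold pvLeastA
      rw [pvD3_keys, hkeys]
      rfl
    rw [hleast, List.foldl_nil]
    exact (PySem.List.sorted_eq_nil_iff _ _ _).mpr rfl
  | cons h0 hs =>
    have hperm : (h0 :: hs).Perm (pvKeys data) := by
      rw [pvKeys_eq, ← hhob]
      exact PySem.List.sorted_perm _ _ _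
    -- the two minima agree
    have hm0 : pvMA data = (hs.map (pvCnt data)).foldl min (pvCnt data h0) := by
      unfold pvMA
      rw [pvCountsA_eq]
      rw [pv_min_perm ((pvKeys data).map (pvCnt data)) ((h0 :: hs).map (pvCnt data))
            ((hperm.map (pvCnt data)).symm)]
      rw [List.map_cons, PySem.List.min?_id_cons]
      rfl
    -- B's loop output
    have hb : ((h0 :: hs).foldl (pvScanStep (pvCnt data))
          ((none : Option Int), ([] : List String))).2 =
        (h0 :: hs).filter (fun h => pvCnt data h == pvMA data) := by
      have hfirst : pvScanStep (pvCnt data) (none, []) h0 = (some (pvCnt data h0), [h0]) := rfl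
      rw [List.foldl_cons, hfirst, pv_scan (pvCnt data) hs (pvCnt data h0) [h0]]
      conv_rhs => rw [hm0]
      rw [List.filter_cons]
      by_cases hfm : pvCnt data h0 = (hs.map (pvCnt data)).foldl min (pvCnt data h0)
      · rw [if_pos hfm, if_pos (beq_iff_eq.mpr hfm)]
        simp
      · rw [if_neg hfm,
            if_neg (show ¬ (pvCnt data h0 ==
                (hs.map (pvCnt data)).foldl min (pvCnt data h0)) = true from
              fun hc => hfm (beq_iff_eq.mp hc))]
        simp
    -- A's filtered key list
    have hleast : pvLeastA data = (pvKeys data).filter (fun h => pvCnt data h == pvMA data) := by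
      unfold pvLeastA
      rw [pvD3_keys, PySem.List.foldl_append_if
            (p := fun h => PySem.List.len ((pvD3 data).getD h []) == pvMA data)
            (f := fun h => h), List.nil_append, List.map_id']
      apply List.filter_congr
      intro h hm'
      rw [pvLen_eq data h hm']
    rw [hb, hleast]
    apply PySem.List.sorted_eq_of_perm_of_pairwise_lt
    · exact hperm.filter _
    · exact List.Pairwise.sublist List.filter_sublist
        (hhob ▸ PySem.List.sorted_ofList_pairwise_lt _)

-- ===== VERDICT (by name: the statement is the Claim_ definition above) =====
theorem find_least_popular_hobbies_spec : Claim_equal_find_least_popular_hobbies := by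
  intro data _ _
  unfold Spec_find_least_popular_hobbies
  exact find_least_popular_hobbies_eq data
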